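-- pv_equiv track=rewrite | github.com/kuznetsovvj/education | algorithms/codeforces/1714c.py | check
-- ===== SOURCE A (Python) =====
-- def check(num):
--     t = {i for i in range(1, 10)}
--     res = set()
--     while num != 0:
--         if num >= 10:
--             s = max(t)
--             num -= s
--             res.add(s)
--             t.remove(s)
--         else:
--             k = num
--             while True:
--                 if k in t:
--                     res.add(k)
--                     t.remove(k)
--                     num -= k
--                     break
--                 else:
--                     k -= 1
--     res = list(res)
--     res.sort()
--     return ''.join(map(str, res))
-- ===== SOURCE B (Python) =====
-- def check(num):
--     res = []
--     for d in range(9, 0, -1):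
--         if num >= d:
--             res.append(d)
--             num -= d
--     res.reverse()
--     return ''.join(map(str, res))
-- ===== Notes on version B (the rewrite author's own statement) =====
-- stated objective: simpler
-- what changed: Replaced A's shrinking digit set with its while-loop (max-selection when num>=10, inner downward membership search otherwise) and final sort by a single descending for-loop over the fixed range 9..1 that greedily takes each digit, then reverses.
import Mathlib
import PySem

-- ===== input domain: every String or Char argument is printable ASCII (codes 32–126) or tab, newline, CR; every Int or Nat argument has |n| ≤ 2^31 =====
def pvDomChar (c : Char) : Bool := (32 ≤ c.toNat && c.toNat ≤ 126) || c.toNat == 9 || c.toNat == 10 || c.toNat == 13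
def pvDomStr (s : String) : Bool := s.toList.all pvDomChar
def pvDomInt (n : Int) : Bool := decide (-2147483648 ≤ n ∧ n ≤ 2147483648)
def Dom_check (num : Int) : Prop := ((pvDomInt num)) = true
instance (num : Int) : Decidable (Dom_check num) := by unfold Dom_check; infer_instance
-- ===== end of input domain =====

-- B replaces A's two-mode while loop (max of a shrinking set + inner downward search) by a
-- single descending sweep over the fixed digit range 9..1; objective: simpler.

-- ===== PORT A =====
-- inner `while True: if k in t … else k -= 1` loop; fuel = none means nontermination (excluded by Pre_)
def checkInner (t : List Int) (k : Int) : Nat → Option Int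
  | 0 => none
  | fuel + 1 => if t.contains k then some k else checkInner t (k - 1) fuel

-- outer `while num != 0` loop over state (t, res, num); fuel = none means nontermination/raise (excluded by Pre_)
def checkLoop (t res : List Int) (num : Int) : Nat → Option (List Int)
  | 0 => none
  | fuel + 1 =>
    if num = 0 then some res
    else if num ≥ 10 then
      match PySem.List.max? t (fun x => x) with
      | none => none            -- Python: max(∅) raises ValueError (excluded by Pre_)
      | some s => checkLoop (t.erase s) (res ++ [s]) (num - s) fuel
    else
      match checkInner t num fuel with
      | none => none
      | some k => checkLoop (t.erase k) (res ++ [k]) (num - k) fuel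

def check (num : Int) : String :=
  match checkLoop [1, 2, 3, 4, 5, 6, 7, 8, 9] [] num 100 with
  | none => ""                  -- unreachable under Pre_check
  | some res => PySem.Str.join "" ((PySem.List.sorted res (fun x => x)).map PySem.Int.toStr)

-- ===== PORT B =====
def check_alt (num : Int) : String :=
  let st := (PySem.List.pyRange 9 0 (-1)).foldl
    (fun (acc : List Int × Int) d =>
      if acc.2 ≥ d then (acc.1 ++ [d], acc.2 - d) else acc) ([], num)
  PySem.Str.join "" ((st.1.reverse).map PySem.Int.toStr)

-- ===== PRECONDITION & SPEC =====
-- A's while loops never terminate for num < 0 or num > 45 (and max(∅) raises for large num):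
-- Pre_check is exactly the set of inputs on which the Python A returns.
def Pre_check (num : Int) : Prop := 0 ≤ num ∧ num ≤ 45
instance (num : Int) : Decidable (Pre_check num) := by unfold Pre_check; infer_instance
def pvWitness_check : Int := (17)

def Spec_check (num : Int) (out : String) : Prop := out = check_alt num
instance (num : Int) (out : String) : Decidable (Spec_check num out) := by unfold Spec_check; infer_instance

-- ===== CLAIM =====
def Claim_equal_check : Prop := ∀ (num : Int), Dom_check num → Pre_check num → Spec_check num (check num)

-- ===== LEMMAS AND PROOFS =====

-- ===== VERDICT =====
theorem check_spec : Claim_equal_check := by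
  intro num _ hp
  obtain ⟨h0, h45⟩ := hp
  unfold Spec_check
  interval_cases num <;> rfl
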